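-- pv_equiv track=rewrite | github.com/lindagaw/Emotion-Recognition-Robust-to-Distance-and-Noise | eval/graphs.py | one_emotion_four_reverb_factors
-- ===== SOURCE A (Python) =====
-- def one_emotion_four_reverb_factors(emotion_x, acc):
--     x_measurement = [2, 4, 6, 8]
--
--     emotion_x, acc = sort_pair_ascending_xs(list(emotion_x), list(acc))
--     two_acc = []
--     four_acc = []
--     six_acc = []
--     eight_acc = []
--
--     for index in range(0, len(emotion_x)):
--         if emotion_x[index] == 2:
--             two_acc.append(acc[index])
--         elif emotion_x[index] == 4:
--             four_acc.append(acc[index])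
--         elif emotion_x[index] == 6:
--             six_acc.append(acc[index])
--         elif emotion_x[index] == 8:
--             eight_acc.append(acc[index])
--
--     return two_acc, four_acc, six_acc, eight_acc
--
-- def sort_pair_ascending_xs(xs, ys):
--     li = []
--     for x, y in zip(xs, ys):
--         li.append((x, y))
--
--     li = sorted(li, key=lambda x: x[0])
--
--     ret_xs = []
--     ret_ys = []
--     for x, y in li:
--         ret_xs.append(x)
--         ret_ys.append(y)
--
--     return ret_xs, ret_ys
-- ===== SOURCE B (Python) =====
-- def one_emotion_four_reverb_factors(emotion_x, acc):
--     pairs = list(zip(emotion_x, acc))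
--     two_acc = [a for x, a in pairs if x == 2]
--     four_acc = [a for x, a in pairs if x == 4]
--     six_acc = [a for x, a in pairs if x == 6]
--     eight_acc = [a for x, a in pairs if x == 8]
--     return two_acc, four_acc, six_acc, eight_acc
-- ===== Notes on version B (the rewrite author's own statement) =====
-- stated objective: simpler
-- what changed: Drops the sort-then-unzip-then-index-loop entirely: since the stable sort cannot change the order inside any one bucket, each bucket is computed directly by an independent filtering pass over zip(emotion_x, acc).
import Mathlib
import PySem

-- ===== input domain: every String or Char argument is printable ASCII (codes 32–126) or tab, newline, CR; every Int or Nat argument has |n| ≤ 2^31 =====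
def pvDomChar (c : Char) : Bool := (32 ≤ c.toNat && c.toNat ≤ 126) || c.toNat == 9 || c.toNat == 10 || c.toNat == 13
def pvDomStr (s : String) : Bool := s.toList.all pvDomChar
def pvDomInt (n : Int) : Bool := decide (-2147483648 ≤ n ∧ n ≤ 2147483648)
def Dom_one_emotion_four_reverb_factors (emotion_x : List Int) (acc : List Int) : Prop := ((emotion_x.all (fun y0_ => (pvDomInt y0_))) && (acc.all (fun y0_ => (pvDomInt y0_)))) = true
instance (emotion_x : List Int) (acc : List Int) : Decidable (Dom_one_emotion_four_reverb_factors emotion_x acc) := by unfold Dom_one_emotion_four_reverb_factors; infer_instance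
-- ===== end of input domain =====

-- B replaces A's sort-then-unzip-then-index-loop by four independent filtering passes over
-- zip(emotion_x, acc) (the stable sort cannot change the order inside any one bucket): simpler.

-- ===== PORT A =====
-- helper sort_pair_ascending_xs, transliterated: build li by appending zipped pairs,
-- stable-sort by first component, then unzip by appending into two accumulator lists.
def sort_pair_ascending_xs (xs : List Int) (ys : List Int) : List Int × List Int :=
  let li := (xs.zip ys).foldl (fun l p => l ++ [p]) ([] : List (Int × Int))
  let li2 := PySem.List.sorted li (fun p => p.1)
  let r := li2.foldl (fun (r : List Int × List Int) p => (r.1 ++ [p.1], r.2 ++ [p.2])) ([], [])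
  (r.1, r.2)

def one_emotion_four_reverb_factors (emotion_x : List Int) (acc : List Int) : List (List Int) :=
  let p := sort_pair_ascending_xs emotion_x acc
  let ex := p.1
  let ac := p.2
  let st := (PySem.List.pyRange 0 (PySem.List.len ex) 1).foldl
    (fun (s : List Int × List Int × List Int × List Int) index =>
      if PySem.List.pyGetD ex index 0 = 2 then
        (s.1 ++ [PySem.List.pyGetD ac index 0], s.2.1, s.2.2.1, s.2.2.2)
      else if PySem.List.pyGetD ex index 0 = 4 then
        (s.1, s.2.1 ++ [PySem.List.pyGetD ac index 0], s.2.2.1, s.2.2.2)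
      else if PySem.List.pyGetD ex index 0 = 6 then
        (s.1, s.2.1, s.2.2.1 ++ [PySem.List.pyGetD ac index 0], s.2.2.2)
      else if PySem.List.pyGetD ex index 0 = 8 then
        (s.1, s.2.1, s.2.2.1, s.2.2.2 ++ [PySem.List.pyGetD ac index 0])
      else s)
    ([], [], [], [])
  [st.1, st.2.1, st.2.2.1, st.2.2.2]

-- ===== PORT B =====
def one_emotion_four_reverb_factors_alt (emotion_x : List Int) (acc : List Int) : List (List Int) :=
  let pairs := emotion_x.zip acc
  [ (pairs.filter (fun p => p.1 == 2)).map (fun p => p.2),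
    (pairs.filter (fun p => p.1 == 4)).map (fun p => p.2),
    (pairs.filter (fun p => p.1 == 6)).map (fun p => p.2),
    (pairs.filter (fun p => p.1 == 8)).map (fun p => p.2) ]

-- ===== PRECONDITION & SPEC =====
def Spec_one_emotion_four_reverb_factors (emotion_x : List Int) (acc : List Int) (out : List (List Int)) : Prop := out = one_emotion_four_reverb_factors_alt emotion_x acc
instance (emotion_x : List Int) (acc : List Int) (out : List (List Int)) : Decidable (Spec_one_emotion_four_reverb_factors emotion_x acc out) := by unfold Spec_one_emotion_four_reverb_factors; infer_instance

-- ===== CLAIM (what is proved, stated in full; the proofs are below) =====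
def Claim_equal_one_emotion_four_reverb_factors : Prop := ∀ (emotion_x : List Int) (acc : List Int), Dom_one_emotion_four_reverb_factors emotion_x acc → Spec_one_emotion_four_reverb_factors emotion_x acc (one_emotion_four_reverb_factors emotion_x acc)

-- ===== LEMMAS AND PROOFS =====

-- Inserting x into a list sorted by first component keeps the filter-by-one-key slice stable:
-- x lands after every element with the same key.
theorem filter_insertBy_key (k : Int) (x : Int × Int) (ys : List (Int × Int))
    (h : ys.Pairwise (fun a b => a.1 ≤ b.1)) :
    (PySem.List.insertBy (fun a b => decide (a.1 < b.1)) x ys).filter (fun p => p.1 == k)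
      = if x.1 == k then ys.filter (fun p => p.1 == k) ++ [x]
        else ys.filter (fun p => p.1 == k) := by
  induction ys with
  | nil =>
    simp only [PySem.List.insertBy]
    split_ifs with hxk <;> simp [hxk]
  | cons y ys ih =>
    have hpw := (List.pairwise_cons.mp h).2
    have hy := (List.pairwise_cons.mp h).1
    show (if decide (x.1 < y.1) = true then x :: y :: ys
          else y :: PySem.List.insertBy (fun a b => decide (a.1 < b.1)) x ys).filter
            (fun p => p.1 == k) = _
    by_cases hlt : x.1 < y.1
    · simp only [hlt, decide_true, if_true]
      by_cases hxk : x.1 = k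
      · have hnil : (y :: ys).filter (fun p => p.1 == k) = [] := by
          apply List.filter_eq_nil_iff.mpr
          intro p hp
          have : y.1 ≤ p.1 := by
            rcases List.mem_cons.mp hp with hp | hp
            · simp [hp]
            · exact hy p hp
          simp only [beq_iff_eq]
          omega
        simp [hxk, hnil]
      · simp [List.filter_cons, hxk]
    · simp only [hlt, decide_false, Bool.false_eq_true, if_false]
      rw [List.filter_cons, List.filter_cons, ih hpw]
      by_cases hxk : x.1 = k <;> by_cases hyk : y.1 = k <;> simp [hxk, hyk]

-- Filtering by one key commutes with the stable sort on the key.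
theorem filter_sorted_key (k : Int) (li : List (Int × Int)) :
    (PySem.List.sorted li (fun p => p.1)).filter (fun p => p.1 == k)
      = li.filter (fun p => p.1 == k) := by
  induction li using List.reverseRecOn with
  | nil => simp [PySem.List.sorted_eq_foldl_insertBy]
  | append_singleton li x ih =>
    have hs : PySem.List.sorted (li ++ [x]) (fun p => p.1)
        = PySem.List.insertBy (fun a b => decide (a.1 < b.1)) x
            (PySem.List.sorted li (fun p => p.1)) := by
      rw [PySem.List.sorted_eq_foldl_insertBy, PySem.List.sorted_eq_foldl_insertBy,
        List.foldl_append]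
      simp
    rw [hs, filter_insertBy_key k x _ (PySem.List.sorted_pairwise li (fun p => p.1)),
      List.filter_append]
    split_ifs with hxk <;> simp [hxk] at * <;> simp [ih]

-- The four-accumulator bucket fold over a list of pairs, in closed form.
theorem bucket_foldl (s : List (Int × Int)) (a b c d : List Int) :
    s.foldl
      (fun (st : List Int × List Int × List Int × List Int) p =>
        if p.1 = 2 then (st.1 ++ [p.2], st.2.1, st.2.2.1, st.2.2.2)
        else if p.1 = 4 then (st.1, st.2.1 ++ [p.2], st.2.2.1, st.2.2.2)
        else if p.1 = 6 then (st.1, st.2.1, st.2.2.1 ++ [p.2], st.2.2.2)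
        else if p.1 = 8 then (st.1, st.2.1, st.2.2.1, st.2.2.2 ++ [p.2])
        else st)
      (a, b, c, d)
      = (a ++ (s.filter (fun p => p.1 == 2)).map (fun p => p.2),
         b ++ (s.filter (fun p => p.1 == 4)).map (fun p => p.2),
         c ++ (s.filter (fun p => p.1 == 6)).map (fun p => p.2),
         d ++ (s.filter (fun p => p.1 == 8)).map (fun p => p.2)) := by
  induction s generalizing a b c d with
  | nil => simp
  | cons p s ih =>
    simp only [List.foldl_cons]
    by_cases h2 : p.1 = 2
    · rw [if_pos h2, ih]; simp [h2]
    · rw [if_neg h2]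
      by_cases h4 : p.1 = 4
      · rw [if_pos h4, ih]; simp [h4]
      · rw [if_neg h4]
        by_cases h6 : p.1 = 6
        · rw [if_pos h6, ih]; simp [h6]
        · rw [if_neg h6]
          by_cases h8 : p.1 = 8
          · rw [if_pos h8, ih]; simp [h8]
          · rw [if_neg h8, ih]; simp [h2, h4, h6, h8]

-- The index loop reading two equal-shape projections of s is a fold over s itself.
theorem foldl_pyRange_two_proj {σ : Type} (s : List (Int × Int))
    (g : σ → Int → Int → σ) (init : σ) :
    (PySem.List.pyRange 0 (PySem.List.len (s.map Prod.fst)) 1).foldl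
      (fun st i => g st (PySem.List.pyGetD (s.map Prod.fst) i 0)
                        (PySem.List.pyGetD (s.map Prod.snd) i 0)) init
      = s.foldl (fun st p => g st p.1 p.2) init := by
  have hlen : PySem.List.len (s.map Prod.fst) = PySem.List.len s := by
    simp [PySem.List.len]
  have hfun : (fun (st : σ) (i : Int) => g st (PySem.List.pyGetD (s.map Prod.fst) i 0)
      (PySem.List.pyGetD (s.map Prod.snd) i 0))
      = fun st i => (fun st (p : Int × Int) => g st p.1 p.2) st
          (PySem.List.pyGetD s i ((0 : Int), (0 : Int))) := by
    funext st i
    rw [show ((0:Int)) = Prod.fst ((0:Int), (0:Int)) from rfl,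
      PySem.List.pyGetD_map Prod.fst s i ((0:Int),(0:Int))]
    rw [show ((0:Int)) = Prod.snd ((0:Int), (0:Int)) from rfl,
      PySem.List.pyGetD_map Prod.snd s i ((0:Int),(0:Int))]
  rw [hlen, hfun]
  exact PySem.List.foldl_pyRange_zero_pyGetD s ((0:Int),(0:Int)) (fun st p => g st p.1 p.2) init

-- ===== VERDICT (by name: the statement is the Claim_ definition above) =====
theorem one_emotion_four_reverb_factors_spec : Claim_equal_one_emotion_four_reverb_factors := by
  intro emotion_x acc _
  unfold Spec_one_emotion_four_reverb_factors
  unfold one_emotion_four_reverb_factors one_emotion_four_reverb_factors_alt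
    sort_pair_ascending_xs
  simp only [PySem.List.foldl_append_singleton]
  rw [PySem.List.foldl_prod_mk (fun l (p : Int × Int) => l ++ [p.1])
    (fun l (p : Int × Int) => l ++ [p.2])]
  simp only [PySem.List.foldl_append_singleton_eq_map, List.nil_append]
  rw [foldl_pyRange_two_proj (PySem.List.sorted (emotion_x.zip acc) (fun p => p.1))
    (fun (st : List Int × List Int × List Int × List Int) x a =>
      if x = 2 then (st.1 ++ [a], st.2.1, st.2.2.1, st.2.2.2)
      else if x = 4 then (st.1, st.2.1 ++ [a], st.2.2.1, st.2.2.2)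
      else if x = 6 then (st.1, st.2.1, st.2.2.1 ++ [a], st.2.2.2)
      else if x = 8 then (st.1, st.2.1, st.2.2.1, st.2.2.2 ++ [a])
      else st) ([], [], [], [])]
  rw [bucket_foldl]
  simp [filter_sorted_key]
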